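-- pv_equiv track=rewrite | github.com/prathamtandon/g4gproblems | Arrays/min_num_from_given_pattern.py | min_num_from_given_pattern
-- ===== SOURCE A (Python) =====
-- def min_num_from_given_pattern(pattern):
--     min_number = []
--     if pattern[0] == 'I':
--         min_number.append(1)
--         min_number.append(2)
--         next_available = 3
--         most_recent_i = 1
--     else:
--         min_number.append(2)
--         min_number.append(1)
--         next_available = 3
--         most_recent_i = 0
--
--     for i in range(1, len(pattern)):
--         if pattern[i] == 'I':
--             min_number.append(next_available)
--             most_recent_i = i+1
--         else:
--             end = len(min_number)
--             min_number.append(min_number[end-1])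
--             for j in range(most_recent_i, i+1):
--                 min_number[j] += 1
--         next_available += 1
--
--     return int(''.join([str(x) for x in min_number]))
-- ===== SOURCE B (Python) =====
-- def min_num_from_given_pattern(pattern):
--     out = []
--     stack = []
--     n = len(pattern)
--     for i in range(n):
--         stack.append(i + 1)
--         if pattern[i] == 'I':
--             while stack:
--                 out.append(stack.pop())
--     stack.append(n + 1)
--     while stack:
--         out.append(stack.pop())
--     return int(''.join(str(x) for x in out))
-- ===== Notes on version B (the rewrite author's own statement) =====
-- stated objective: faster
-- what changed: Replaces A's scheme of appending a copied digit and re-incrementing the whole current descent run after every non-'I' character (quadratic) with a single-pass stack that pushes position numbers and flushes them in reverse on each 'I' and at the end.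
import Mathlib
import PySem

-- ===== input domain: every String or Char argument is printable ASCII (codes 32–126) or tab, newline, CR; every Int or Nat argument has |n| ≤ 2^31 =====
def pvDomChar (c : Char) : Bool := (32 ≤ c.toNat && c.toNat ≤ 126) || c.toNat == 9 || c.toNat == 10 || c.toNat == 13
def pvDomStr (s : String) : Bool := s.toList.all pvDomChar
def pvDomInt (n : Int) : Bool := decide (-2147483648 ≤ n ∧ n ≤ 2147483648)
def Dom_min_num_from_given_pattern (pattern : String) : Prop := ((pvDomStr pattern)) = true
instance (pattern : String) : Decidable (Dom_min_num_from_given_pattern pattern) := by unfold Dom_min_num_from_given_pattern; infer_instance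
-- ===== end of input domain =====

-- B replaces A's quadratic re-increment of the current descent run with a one-pass
-- stack (push positions, flush in reverse on 'I' and at the end): asymptotically faster.

-- ===== PORT A =====
-- one iteration of A's main loop (i is the Python loop index)
def pvStepA (p : List Char) (s : List Int × Int × Int) (i : Int) : List Int × Int × Int :=
  if PySem.List.pyGetD p i ' ' = 'I' then
    (s.1 ++ [s.2.1], s.2.1 + 1, i + 1)
  else
    -- end = len(min_number); append min_number[end-1]; then the inner increment loop
    let mn1 := s.1 ++ [PySem.List.pyGetD s.1 ((s.1.length : Int) - 1) 0]
    ((PySem.List.pyRange s.2.2 (i + 1) 1).foldl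
        (fun m j => PySem.List.pySetD m j (PySem.List.pyGetD m j 0 + 1)) mn1,
      s.2.1 + 1, s.2.2)

def min_num_from_given_pattern (pattern : String) : Int :=
  let p := pattern.toList
  match PySem.List.pyGet? p 0 with
  | none => 0  -- IndexError on pattern[0]: excluded by Pre_
  | some c =>
    let init : List Int × Int × Int := if c = 'I' then ([1, 2], 3, 1) else ([2, 1], 3, 0)
    let st := (PySem.List.pyRange 1 (p.length : Int) 1).foldl (pvStepA p) init
    (PySem.Int.ofChars? (PySem.Chars.join [] (st.1.map PySem.Int.toChars))).getD 0

-- ===== PORT B =====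
-- 'while stack: out.append(stack.pop())'; the fuel (initial stack length) bounds the iterations
def pvDrainGo : Nat → List Int → List Int → List Int
  | 0, out, _ => out
  | fuel + 1, out, stack =>
    match PySem.List.pop? stack with
    | none => out
    | some r => pvDrainGo fuel (out ++ [r.1]) r.2

def pvDrain (out stack : List Int) : List Int := pvDrainGo stack.length out stack

-- one iteration of B's main loop
def pvStepB (p : List Char) (s : List Int × List Int) (i : Int) : List Int × List Int :=
  let stack := s.2 ++ [i + 1]
  if PySem.List.pyGetD p i ' ' = 'I' then (pvDrain s.1 stack, []) else (s.1, stack)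

def min_num_from_given_pattern_alt (pattern : String) : Int :=
  let p := pattern.toList
  let st := (PySem.List.pyRange 0 (p.length : Int) 1).foldl (pvStepB p) ([], [])
  let out := pvDrain st.1 (st.2 ++ [(p.length : Int) + 1])
  (PySem.Int.ofChars? (PySem.Chars.join [] (out.map PySem.Int.toChars))).getD 0

-- ===== PRECONDITION & SPEC =====
-- A raises IndexError on the empty pattern (pattern[0]); Pre_ excludes exactly that input.
def Pre_min_num_from_given_pattern (pattern : String) : Prop := pattern ≠ ""
instance (pattern : String) : Decidable (Pre_min_num_from_given_pattern pattern) := by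
  unfold Pre_min_num_from_given_pattern; infer_instance

def pvWitness_min_num_from_given_pattern : String := "ID"

def Spec_min_num_from_given_pattern (pattern : String) (out : Int) : Prop := out = min_num_from_given_pattern_alt pattern
instance (pattern : String) (out : Int) : Decidable (Spec_min_num_from_given_pattern pattern out) := by unfold Spec_min_num_from_given_pattern; infer_instance

-- ===== CLAIM (what is proved, stated in full; the proofs are below) =====
def Claim_equal_min_num_from_given_pattern : Prop := ∀ (pattern : String), Dom_min_num_from_given_pattern pattern → Pre_min_num_from_given_pattern pattern → Spec_min_num_from_given_pattern pattern (min_num_from_given_pattern pattern)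

-- ===== LEMMAS AND PROOFS =====

lemma pvDrainGo_eq : ∀ (fuel : Nat) (stack out : List Int), stack.length ≤ fuel →
    pvDrainGo fuel out stack = out ++ stack.reverse := by
  intro fuel
  induction fuel with
  | zero =>
      intro stack out h
      have : stack = [] := List.length_eq_zero_iff.mp (Nat.le_zero.mp h)
      subst this; simp [pvDrainGo]
  | succ n ih =>
      intro stack out h
      cases stack using List.reverseRecOn with
      | nil => simp [pvDrainGo, PySem.List.pop?]
      | append_singleton xs x =>
          rw [pvDrainGo, PySem.List.pop?_last]
          have hx : xs.length ≤ n := by simpa using h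
          simp [ih xs (out ++ [x]) hx]

lemma pvDrain_eq (out stack : List Int) : pvDrain out stack = out ++ stack.reverse :=
  pvDrainGo_eq stack.length stack out le_rfl

-- the descending run [top, top-1, …, top-len+1]
def pvDesc (top : Int) : Nat → List Int
  | 0 => []
  | n + 1 => top :: pvDesc (top - 1) n

lemma pvDesc_length (top : Int) (n : Nat) : (pvDesc top n).length = n := by
  induction n generalizing top with
  | zero => rfl
  | succ n ih => simp [pvDesc, ih]

lemma pvDesc_snoc (top : Int) (n : Nat) :
    pvDesc top (n + 1) = pvDesc top n ++ [top - n] := by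
  induction n generalizing top with
  | zero => simp [pvDesc]
  | succ n ih =>
      show top :: pvDesc (top - 1) (n + 1) = pvDesc top (n + 1) ++ [top - ((n + 1 : Nat) : Int)]
      rw [ih]
      have h' : top - 1 - (n : Int) = top - ((n + 1 : Nat) : Int) := by omega
      simp [pvDesc, h']

lemma pvDesc_map_add_one (top : Int) (n : Nat) :
    (pvDesc top n).map (· + 1) = pvDesc (top + 1) n := by
  induction n generalizing top with
  | zero => rfl
  | succ n ih => simp [pvDesc, ih]

lemma pv_pyGetD_last (xs : List Int) (y : Int) :
    PySem.List.pyGetD (xs ++ [y]) (((xs ++ [y]).length : Int) - 1) 0 = y := by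
  have h : ((xs ++ [y]).length : Int) - 1 = ((xs.length : Nat) : Int) := by simp
  rw [h, PySem.List.pyGetD_natCast]
  simp [List.getD]

lemma pv_incr_fold (mid : List Int) : ∀ (out tail : List Int),
    (PySem.List.pyRange (out.length : Int) ((out.length : Int) + (mid.length : Int)) 1).foldl
        (fun m j => PySem.List.pySetD m j (PySem.List.pyGetD m j 0 + 1)) (out ++ (mid ++ tail))
      = out ++ (mid.map (· + 1) ++ tail) := by
  induction mid with
  | nil =>
      intro out tail
      rw [PySem.List.pyRange_one_eq_nil (by simp)]
      simp
  | cons x mid ih =>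
      intro out tail
      rw [PySem.List.pyRange_one_cons (by simp)]
      rw [List.foldl_cons]
      have hget : PySem.List.pyGetD (out ++ (x :: mid ++ tail)) ((out.length : Int)) 0 = x := by
        rw [PySem.List.pyGetD_natCast]
        simp [List.getD]
      have hset : PySem.List.pySetD (out ++ (x :: mid ++ tail)) ((out.length : Int)) (x + 1)
          = (out ++ [x + 1]) ++ (mid ++ tail) := by
        rw [PySem.List.pySetD_natCast]
        rw [List.set_append_right _ _ le_rfl]
        simp
      rw [hget, hset]
      have harg : ((out.length : Int) + 1) = (((out ++ [x + 1]).length : Nat) : Int) := by simp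
      have hend : ((out.length : Int) + ((x :: mid).length : Int))
          = (((out ++ [x + 1]).length : Nat) : Int) + ((mid.length : Nat) : Int) := by
        simp
        omega
      rw [harg, hend, ih (out ++ [x + 1]) tail]
      simp

-- the loop invariant: after k characters A's state is B's flushed output followed by the
-- reversed pending run, A's most_recent_i is the flushed length, A's next_available is k+2
lemma pv_inv (p : List Char) (c : Char) (hc : p[0]? = some c) :
    ∀ (k : Nat), 1 ≤ k → k ≤ p.length → ∀ out stack,
    (PySem.List.pyRange 0 (k : Int) 1).foldl (pvStepB p) ([], []) = (out, stack) →
    out.length ≤ k ∧ stack = (pvDesc (k : Int) (k - out.length)).reverse ∧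
    (PySem.List.pyRange 1 (k : Int) 1).foldl (pvStepA p)
        (if c = 'I' then ([1, 2], 3, 1) else ([2, 1], 3, 0))
      = (out ++ pvDesc ((k : Int) + 1) (k + 1 - out.length), (k : Int) + 2, (out.length : Int)) := by
  intro k
  induction k with
  | zero => omega
  | succ m ih =>
      intro h1 h2 out stack hB
      have hmp : m < p.length := by omega
      have hpm : PySem.List.pyGetD p ((m : Nat) : Int) ' ' = p[m] := by
        rw [PySem.List.pyGetD_natCast]; exact List.getD_eq_getElem p ' ' hmp
      by_cases hm : m = 0
      · -- base case k = 1
        subst hm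
        cases p with
        | nil => simp at hc
        | cons c0 rest =>
            simp only [List.getElem?_cons_zero, Option.some.injEq] at hc
            subst hc
            have hr : (PySem.List.pyRange 0 ((0 + 1 : Nat) : Int) 1) = [(0 : Int)] := by
              norm_num [PySem.List.pyRange_one_cons (show (0 : Int) < 1 by norm_num),
                PySem.List.pyRange_one_eq_nil]
            rw [hr] at hB
            simp only [List.foldl_cons, List.foldl_nil, pvStepB, List.nil_append,
              PySem.List.pyGetD_zero_cons] at hB
            have hrA : (PySem.List.pyRange 1 ((0 + 1 : Nat) : Int) 1) = [] := by
              apply PySem.List.pyRange_one_eq_nil; norm_num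
            rw [hrA, List.foldl_nil]
            by_cases hcI : c0 = 'I'
            · rw [if_pos hcI] at hB
              rw [pvDrain_eq] at hB
              simp only [List.nil_append, List.reverse_cons, List.reverse_nil] at hB
              injection hB with ho hs
              subst ho; subst hs
              refine ⟨by norm_num, by norm_num [pvDesc], ?_⟩
              rw [if_pos hcI]
              norm_num [pvDesc]
            · rw [if_neg hcI] at hB
              injection hB with ho hs
              subst ho; subst hs
              refine ⟨by norm_num, by norm_num [pvDesc], ?_⟩
              rw [if_neg hcI]
              norm_num [pvDesc]
      · -- step case: k = m + 1 with 1 ≤ m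
        have hm1 : 1 ≤ m := by omega
        have hcast : ((m + 1 : Nat) : Int) = (m : Int) + 1 := by push_cast; ring
        rw [hcast, PySem.List.pyRange_one_succ_right (by positivity), List.foldl_append,
          List.foldl_cons, List.foldl_nil] at hB
        obtain ⟨out0, stack0, hB0⟩ : ∃ o s,
            (PySem.List.pyRange 0 (m : Int) 1).foldl (pvStepB p) ([], []) = (o, s) :=
          ⟨_, _, rfl⟩
        obtain ⟨ha0, hs0, hA0⟩ := ih hm1 (by omega) out0 stack0 hB0
        rw [hB0] at hB
        rw [hcast, PySem.List.pyRange_one_succ_right (by exact_mod_cast hm1), List.foldl_append,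
          List.foldl_cons, List.foldl_nil, hA0]
        simp only [pvStepB, pvStepA, hpm] at hB ⊢
        by_cases hI : p[m] = 'I'
        · -- 'I' branch: the stack is flushed
          rw [if_pos hI] at hB ⊢
          rw [pvDrain_eq, hs0] at hB
          simp only [List.reverse_append, List.reverse_reverse, List.reverse_cons,
            List.reverse_nil, List.nil_append, List.cons_append] at hB
          injection hB with ho hs
          subst ho; subst hs
          have hone : pvDesc ((m : Int) + 1) (m + 1 - out0.length)
              = ((m : Int) + 1) :: pvDesc (m : Int) (m - out0.length) := by
            have h' : m + 1 - out0.length = (m - out0.length) + 1 := by omega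
            rw [h', pvDesc]
            norm_num
          refine ⟨by simp [pvDesc_length]; omega, ?_, ?_⟩
          · have h0 : m + 1 -
                (out0 ++ ((m : Int) + 1) :: pvDesc (m : Int) (m - out0.length)).length = 0 := by
              simp [pvDesc_length]
              omega
            rw [h0]
            simp [pvDesc]
          · rw [hone]
            have h2 : m + 1 + 1 -
                (out0 ++ ((m : Int) + 1) :: pvDesc (m : Int) (m - out0.length)).length = 1 := by
              simp [pvDesc_length]
              omega
            have hlen2 : ((out0 ++ ((m : Int) + 1)
                :: pvDesc (m : Int) (m - out0.length)).length : Int) = (m : Int) + 1 := by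
              simp [pvDesc_length]
              omega
            rw [h2, hlen2]
            have h5 : ((m : Int) + 1) + 1 = (m : Int) + 2 := by ring
            rw [pvDesc, h5, pvDesc]
            norm_num
            omega
        · -- 'D' branch: copy the last digit, increment the pending run
          rw [if_neg hI] at hB ⊢
          injection hB with ho hs
          subst ho; subst hs
          have hsub : m + 1 - out0.length = (m - out0.length) + 1 := by omega
          have hdesc1 : pvDesc ((m : Int) + 1) (m + 1 - out0.length)
              = pvDesc ((m : Int) + 1) (m - out0.length) ++ [(out0.length : Int) + 1] := by
            rw [hsub, pvDesc_snoc]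
            congr 2
            omega
          refine ⟨by omega, ?_, ?_⟩
          · rw [hsub, pvDesc]
            simp [hs0]
          · -- the A-side step
            have hget : PySem.List.pyGetD (out0 ++ pvDesc ((m : Int) + 1) (m + 1 - out0.length))
                (((out0 ++ pvDesc ((m : Int) + 1) (m + 1 - out0.length)).length : Int) - 1) 0
                = (out0.length : Int) + 1 := by
              rw [hdesc1, ← List.append_assoc]
              exact pv_pyGetD_last _ _
            rw [hget]
            have hshape : (out0 ++ pvDesc ((m : Int) + 1) (m + 1 - out0.length))
                ++ [(out0.length : Int) + 1]
                = out0 ++ (pvDesc ((m : Int) + 1) (m + 1 - out0.length)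
                    ++ [(out0.length : Int) + 1]) := by
              rw [List.append_assoc]
            have hend : (m : Int) + 1 = (out0.length : Int)
                + ((pvDesc ((m : Int) + 1) (m + 1 - out0.length)).length : Int) := by
              rw [pvDesc_length]; omega
            have hfold := pv_incr_fold (pvDesc ((m : Int) + 1) (m + 1 - out0.length)) out0
              [(out0.length : Int) + 1]
            rw [← hend] at hfold
            rw [hshape, hfold]
            have hmap : (pvDesc ((m : Int) + 1) (m + 1 - out0.length)).map (· + 1)
                = pvDesc ((m : Int) + 2) (m + 1 - out0.length) := by
              rw [pvDesc_map_add_one]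
              have h6 : ((m : Int) + 1) + 1 = (m : Int) + 2 := by ring
              rw [h6]
            have hdesc2 : pvDesc ((m : Int) + 2) (m + 1 - out0.length)
                ++ [(out0.length : Int) + 1]
                = pvDesc ((m : Int) + 2) ((m + 1 - out0.length) + 1) := by
              rw [pvDesc_snoc]
              congr 2
              omega
            rw [hmap, hdesc2]
            have ht : ((m : Int) + 1 + 1) = (m : Int) + 2 := by ring
            have hn : m + 1 + 1 - out0.length = (m + 1 - out0.length) + 1 := by omega
            rw [ht, hn]
            simp only [Prod.mk.injEq, true_and, and_true]
            omega

-- ===== VERDICT (by name: the statement is the Claim_ definition above) =====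
theorem min_num_from_given_pattern_spec : Claim_equal_min_num_from_given_pattern := by
  intro pattern _ hpre
  unfold Spec_min_num_from_given_pattern
  obtain ⟨c, rest, hp⟩ : ∃ c rest, pattern.toList = c :: rest := by
    cases h : pattern.toList with
    | nil => exact absurd (by cases pattern; simp_all) hpre
    | cons a l => exact ⟨a, l, rfl⟩
  simp only [min_num_from_given_pattern, min_num_from_given_pattern_alt, hp,
    PySem.List.pyGet?_zero_cons]
  obtain ⟨out, stack, hB⟩ : ∃ o s,
      (PySem.List.pyRange 0 (((c :: rest).length : Nat) : Int) 1).foldl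
        (pvStepB (c :: rest)) ([], []) = (o, s) := ⟨_, _, rfl⟩
  obtain ⟨ha, hs, hA⟩ := pv_inv (c :: rest) c rfl (c :: rest).length (by simp) le_rfl out stack hB
  rw [hB, hA]
  have hlist : out ++ pvDesc ((((c :: rest).length : Nat) : Int) + 1)
        ((c :: rest).length + 1 - out.length)
      = pvDrain out (stack ++ [(((c :: rest).length : Nat) : Int) + 1]) := by
    rw [pvDrain_eq, hs]
    have hsub : (c :: rest).length + 1 - out.length
        = ((c :: rest).length - out.length) + 1 := by omega
    rw [hsub, pvDesc]
    simp
  rw [hlist]
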